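-- pv_equiv track=rewrite | github.com/furkanaktas/CSE-321 | hw5/decentNumber_141044029.py | decentNumber
-- ===== SOURCE A (Python) =====
-- def fives(num):
-- 	sum_num = 0
-- 	result = 0
-- 	for i in range(num):
-- 		sum_num += 5
-- 		result += (10**i)*5
--
-- 	if sum_num % 3 == 0:
-- 		return result
-- 	else:
-- 		return 0
--
-- def threes(num):
-- 	sum_num = 0
-- 	result = 0
-- 	for i in range(num):
-- 		sum_num += 3
-- 		result += (10**i)*3
--
-- 	if sum_num % 5 == 0:
-- 		return result
-- 	else:
-- 		return 0
--
-- def decentNumber(num):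
-- 	if num < 3:
-- 		return -1
--
-- 	else:
-- 		result = fives(num)
-- 		if result != 0:
-- 			return result		# hepsi 5 olabiliyorsa
--
--
-- 		#karışık sayılar için
-- 		three = 5    # en az 5 tane 3 gerekli, 5'e bölünmesi için
-- 		while three <= num:
-- 			res_three = threes(three)
-- 			res_five = fives(num-three)	# sayının kalanı 5 olursa
-- 										# 3'e bölünüyor mu
-- 			if res_three != 0 and res_five != 0:
-- 				return res_five*(10**three) + res_three
--
-- 			three += 5 # 5'e bölünme için
-- 					   # 3'ten 5'in katı sayıda olması lazım
--
--
-- 		result = threes(num)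
-- 		if result != 0:
-- 			return result	# hepsi 3 olabiliyorsa
--
-- 		return -1		# hiç biri değilse return -1
-- ===== SOURCE B (Python) =====
-- def decentNumber(num):
--     if num < 3:
--         return -1
--     r = num % 3
--     t = 0 if r == 0 else (10 if r == 1 else 5)
--     f = num - t
--     if f > 0:
--         return 5 * (10 ** f - 1) // 9 * 10 ** t + 3 * (10 ** t - 1) // 9
--     if num % 5 == 0:
--         return 3 * (10 ** num - 1) // 9
--     return -1
-- ===== Notes on version B (the rewrite author's own statement) =====
-- stated objective: faster
-- what changed: B replaces A's quadratic digit-accumulating loops (fives/threes rebuilt from scratch for every candidate split) and the while-search over candidate counts with a constant-time residue computation (num mod three determines the count of trailing threes directly) plus one closed-form repunit construction via integer power and exact division.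
import Mathlib
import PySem

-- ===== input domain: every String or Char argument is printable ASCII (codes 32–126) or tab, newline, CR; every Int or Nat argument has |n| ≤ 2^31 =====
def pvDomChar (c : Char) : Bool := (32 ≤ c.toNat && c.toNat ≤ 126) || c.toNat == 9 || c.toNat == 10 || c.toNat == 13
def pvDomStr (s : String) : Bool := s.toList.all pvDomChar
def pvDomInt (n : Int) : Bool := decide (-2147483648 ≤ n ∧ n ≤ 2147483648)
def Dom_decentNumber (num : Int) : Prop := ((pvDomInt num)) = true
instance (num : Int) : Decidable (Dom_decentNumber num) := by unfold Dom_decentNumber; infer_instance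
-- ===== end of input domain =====

-- B replaces A's quadratic digit-accumulation loops and the while-search over candidate
-- counts of threes with an O(1) residue computation (num mod 3 picks the count of trailing
-- threes) and closed-form repunit arithmetic.

-- ===== PORT A =====
def fivesA (num : Int) : Int :=
  let p := (PySem.List.pyRange 0 num 1).foldl
    (fun (p : Int × Int) i => (p.1 + 5, p.2 + 10 ^ i.toNat * 5)) (0, 0)
  if PySem.Int.mod p.1 3 = 0 then p.2 else 0

def threesA (num : Int) : Int :=
  let p := (PySem.List.pyRange 0 num 1).foldl
    (fun (p : Int × Int) i => (p.1 + 3, p.2 + 10 ^ i.toNat * 3)) (0, 0)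
  if PySem.Int.mod p.1 5 = 0 then p.2 else 0

-- the 'while three <= num' loop of A, with the post-loop all-threes check in the exit branch
def loopA (num three : Int) : Int :=
  if h : three ≤ num then
    let res_three := threesA three
    let res_five := fivesA (num - three)
    if res_three ≠ 0 ∧ res_five ≠ 0 then
      res_five * 10 ^ three.toNat + res_three
    else
      loopA num (three + 5)
  else
    let result := threesA num
    if result ≠ 0 then result else -1
termination_by (num + 1 - three).toNat
decreasing_by omega

def decentNumber (num : Int) : Int :=
  if num < 3 then -1
  else
    let result := fivesA num
    if result ≠ 0 then result
    else loopA num 5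

-- ===== PORT B =====
def decentNumber_alt (num : Int) : Int :=
  if num < 3 then -1
  else
    let r := PySem.Int.mod num 3
    let t : Int := if r = 0 then 0 else if r = 1 then 10 else 5
    let f := num - t
    if 0 < f then
      PySem.Int.floordiv (5 * (10 ^ f.toNat - 1)) 9 * 10 ^ t.toNat +
        PySem.Int.floordiv (3 * (10 ^ t.toNat - 1)) 9
    else if PySem.Int.mod num 5 = 0 then
      PySem.Int.floordiv (3 * (10 ^ num.toNat - 1)) 9
    else -1

-- ===== PRECONDITION & SPEC =====
def Spec_decentNumber (num : Int) (out : Int) : Prop := out = decentNumber_alt num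
instance (num : Int) (out : Int) : Decidable (Spec_decentNumber num out) := by unfold Spec_decentNumber; infer_instance

-- ===== CLAIM (what is proved, stated in full; the proofs are below) =====
def Claim_equal_decentNumber : Prop := ∀ (num : Int), Dom_decentNumber num → Spec_decentNumber num (decentNumber num)

-- ===== LEMMAS AND PROOFS =====

-- repunit scaffold: repG n = 1 + 10 + ... + 10^(n-1)
def repG : Nat → Int
  | 0 => 0
  | n + 1 => repG n + 10 ^ n

theorem nineG (n : Nat) : 9 * repG n = 10 ^ n - 1 := by
  induction n with
  | zero => simp [repG]
  | succ n ih => simp only [repG, pow_succ]; linarith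

theorem fd9 (k : Int) : PySem.Int.floordiv (9 * k) 9 = k := by
  rw [PySem.Int.floordiv_eq_ediv_of_pos (by norm_num)]; omega

theorem fdrep (c : Int) (n : Nat) :
    PySem.Int.floordiv (c * (10 ^ n - 1)) 9 = c * repG n := by
  have h : c * (10 ^ n - 1) = 9 * (c * repG n) := by rw [← nineG n]; ring
  rw [h, fd9]

theorem edrep (c : Int) (n : Nat) : c * (10 ^ n - 1) / 9 = c * repG n := by
  have h : c * (10 ^ n - 1) = 9 * (c * repG n) := by rw [← nineG n]; ring
  rw [h, Int.mul_ediv_cancel_left _ (by norm_num)]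

theorem repG_pos (n : Nat) (h : 0 < n) : 0 < repG n := by
  obtain ⟨m, rfl⟩ : ∃ m, n = m + 1 := ⟨n - 1, by omega⟩
  have h1 : 0 ≤ repG m := by
    clear h
    induction m with
    | zero => simp [repG]
    | succ k ih => have : (0:Int) ≤ 10 ^ k := by positivity
                   simp only [repG]; linarith
  have h2 : (0:Int) < 10 ^ m := by positivity
  simp only [repG]; linarith

theorem fold_closed (d : Int) (n : Nat) :
    (PySem.List.pyRange 0 (n : Int) 1).foldl
      (fun (p : Int × Int) i => (p.1 + d, p.2 + 10 ^ i.toNat * d)) (0, 0)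
    = (d * n, repG n * d) := by
  induction n with
  | zero => simp [PySem.List.pyRange_one_eq_nil, repG]
  | succ n ih =>
      have hsp : PySem.List.pyRange 0 ((n:Int) + 1) 1
          = PySem.List.pyRange 0 (n:Int) 1 ++ [(n:Int)] :=
        PySem.List.pyRange_one_succ_right (by omega)
      push_cast
      rw [hsp, List.foldl_append, ih]
      simp only [List.foldl_cons, List.foldl_nil, Int.toNat_natCast, repG, Prod.mk.injEq]
      constructor <;> ring

theorem fivesA_eq (num : Int) :
    fivesA num = if 3 ∣ num then 5 * repG num.toNat else 0 := by
  by_cases h : 0 ≤ num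
  · obtain ⟨n, rfl⟩ := Int.eq_ofNat_of_zero_le h
    simp only [fivesA, fold_closed,
      PySem.Int.mod_eq_emod_of_pos (show (0:Int) < 3 by norm_num), Int.toNat_natCast]
    by_cases h3 : (3:Int) ∣ (n:Int)
    · rw [if_pos (by omega), if_pos h3]; ring
    · rw [if_neg (by omega), if_neg h3]
  · have ht : num.toNat = 0 := by omega
    simp only [fivesA, PySem.List.pyRange_one_eq_nil (show num ≤ 0 by omega),
      List.foldl_nil, ht]
    norm_num [PySem.Int.mod, repG]

theorem threesA_eq (num : Int) :
    threesA num = if 5 ∣ num then 3 * repG num.toNat else 0 := by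
  by_cases h : 0 ≤ num
  · obtain ⟨n, rfl⟩ := Int.eq_ofNat_of_zero_le h
    simp only [threesA, fold_closed,
      PySem.Int.mod_eq_emod_of_pos (show (0:Int) < 5 by norm_num), Int.toNat_natCast]
    by_cases h5 : (5:Int) ∣ (n:Int)
    · rw [if_pos (by omega), if_pos h5]; ring
    · rw [if_neg (by omega), if_neg h5]
  · have ht : num.toNat = 0 := by omega
    simp only [threesA, PySem.List.pyRange_one_eq_nil (show num ≤ 0 by omega),
      List.foldl_nil, ht]
    norm_num [PySem.Int.mod, repG]

theorem loop_no_hit (num three : Int)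
    (h : ∀ t, three ≤ t → t < num → ¬(5 ∣ t ∧ (num - t) % 3 = 0)) :
    loopA num three = (if threesA num ≠ 0 then threesA num else -1) := by
  induction hk : (num + 1 - three).toNat using Nat.strong_induction_on generalizing three with
  | _ k IH =>
    rw [loopA]
    by_cases hle : three ≤ num
    · rw [dif_pos hle]
      have hcond : ¬(threesA three ≠ 0 ∧ fivesA (num - three) ≠ 0) := by
        rw [threesA_eq, fivesA_eq]
        rcases eq_or_lt_of_le hle with heq | hlt
        · subst heq
          rintro ⟨-, h2⟩
          simp [repG] at h2
        · rintro ⟨h1, h2⟩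
          split_ifs at h1 h2 with hd5 hd3 hd3'
          · exact h three le_rfl hlt ⟨hd5, by omega⟩
          · exact h2 rfl
          · exact h1 rfl
          · exact h1 rfl
      simp only [if_neg hcond]
      exact IH (num + 1 - (three + 5)).toNat (by omega)
        (three + 5) (fun t ht1 ht2 => h t (by omega) ht2) rfl
    · rw [dif_neg hle]

theorem loop_hit (num three t0 : Int) (h5 : 5 ∣ three) (hge : 5 ≤ three)
    (ht5 : 5 ∣ t0) (hlt : t0 < num) (hmod : (num - t0) % 3 = 0) (hmin : three ≤ t0)
    (hno : ∀ t, three ≤ t → t < t0 → ¬(5 ∣ t ∧ (num - t) % 3 = 0)) :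
    loopA num three = fivesA (num - t0) * 10 ^ t0.toNat + threesA t0 := by
  induction hk : (t0 - three).toNat using Nat.strong_induction_on generalizing three with
  | _ k IH =>
    rw [loopA]
    rw [dif_pos (by omega)]
    rcases eq_or_lt_of_le hmin with heq | hltt
    · subst heq
      have h1 : threesA three ≠ 0 := by
        rw [threesA_eq, if_pos ht5]
        have := repG_pos three.toNat (by omega)
        omega
      have h2 : fivesA (num - three) ≠ 0 := by
        rw [fivesA_eq, if_pos (by omega)]
        have := repG_pos (num - three).toNat (by omega)
        omega
      simp only [if_pos (And.intro h1 h2)]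
    · have hcond : ¬(threesA three ≠ 0 ∧ fivesA (num - three) ≠ 0) := by
        have hnd : ¬ (3:Int) ∣ (num - three) := by
          have := hno three le_rfl hltt
          omega
        rw [fivesA_eq, if_neg hnd]
        rintro ⟨-, h2⟩
        exact h2 rfl
      simp only [if_neg hcond]
      exact IH (t0 - (three + 5)).toNat (by omega) (three + 5) (by omega)
        (by omega) (by omega)
        (fun t ht1 ht2 => hno t (by omega) ht2) rfl

theorem decentNumber_eq_alt (num : Int) : decentNumber num = decentNumber_alt num := by
  simp only [decentNumber, decentNumber_alt]
  by_cases hlt : num < 3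
  · simp [hlt]
  · rw [if_neg hlt, if_neg hlt]
    have h3n : 3 ≤ num := by omega
    rw [show PySem.Int.mod num 3 = num % 3 from
          PySem.Int.mod_eq_emod_of_pos (by norm_num),
        show PySem.Int.mod num 5 = num % 5 from
          PySem.Int.mod_eq_emod_of_pos (by norm_num),
        fivesA_eq]
    by_cases h3 : (3:Int) ∣ num
    · -- all fives
      have hm : num % 3 = 0 := by omega
      have hnz : 5 * repG num.toNat ≠ 0 := by
        have := repG_pos num.toNat (by omega); omega
      rw [if_pos h3, if_pos hnz, if_pos hm, if_pos (show (0:Int) < num - 0 by omega)]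
      norm_num [fdrep, edrep, repG]
    · have hm : num % 3 ≠ 0 := by omega
      rw [if_neg h3]
      simp only [ne_eq, not_true_eq_false, if_false, if_neg hm]
      by_cases h31 : num % 3 = 1
      · rw [if_pos h31]
        by_cases hbig : (10:Int) < num
        · rw [loop_hit num 5 10 (by norm_num) le_rfl (by norm_num) hbig (by omega)
            (by norm_num) (fun t ht1 ht2 => by omega),
            if_pos (show (0:Int) < num - 10 by omega),
            fivesA_eq, if_pos (show (3:Int) ∣ num - 10 by omega),
            threesA_eq, if_pos (show (5:Int) ∣ (10:Int) by norm_num)]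
          norm_num [fdrep, edrep]
        · rw [loop_no_hit num 5 (fun t ht1 ht2 => by omega),
            if_neg (show ¬ (0:Int) < num - 10 by omega), threesA_eq]
          by_cases h5d : (5:Int) ∣ num
          · have h50 : num % 5 = 0 := by omega
            have hnz : 3 * repG num.toNat ≠ 0 := by
              have := repG_pos num.toNat (by omega); omega
            rw [if_pos h5d, if_pos hnz, if_pos h50, fdrep]
          · have h50 : ¬ num % 5 = 0 := by omega
            rw [if_neg h5d, if_neg h50]
            norm_num
      · have h32 : num % 3 = 2 := by omega
        rw [if_neg h31]
        by_cases hbig : (5:Int) < num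
        · rw [loop_hit num 5 5 (by norm_num) le_rfl (by norm_num) hbig (by omega)
            le_rfl (fun t ht1 ht2 => by omega),
            if_pos (show (0:Int) < num - 5 by omega),
            fivesA_eq, if_pos (show (3:Int) ∣ num - 5 by omega),
            threesA_eq, if_pos (show (5:Int) ∣ (5:Int) by norm_num)]
          norm_num [fdrep, edrep]
        · rw [loop_no_hit num 5 (fun t ht1 ht2 => by omega),
            if_neg (show ¬ (0:Int) < num - 5 by omega), threesA_eq]
          by_cases h5d : (5:Int) ∣ num
          · have h50 : num % 5 = 0 := by omega
            have hnz : 3 * repG num.toNat ≠ 0 := by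
              have := repG_pos num.toNat (by omega); omega
            rw [if_pos h5d, if_pos hnz, if_pos h50, fdrep]
          · have h50 : ¬ num % 5 = 0 := by omega
            rw [if_neg h5d, if_neg h50]
            norm_num

-- ===== VERDICT (by name: the statement is the Claim_ definition above) =====
theorem decentNumber_spec : Claim_equal_decentNumber := by
  intro num _
  unfold Spec_decentNumber
  exact decentNumber_eq_alt num
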